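-- pv_equiv track=rewrite | github.com/stranskj/xdskappa | xdskappa/common.py | MakeXDSParam
-- ===== SOURCE A (Python) =====
-- def MakeXDSParam(inParList):
--     """
--     Parse input from prameters modifing XDS.INP
--
--     @param inParList: Parameters from input -p or --parameter
--     @type inParList: list of list of string
--
--     @return outParLitst: list of parameters as strings "PAR= VALUE1 VALUE2 ..."
--     @type   outParLitst: list of string
--     """
--     outParList = []
--     i = -1
--     for par in inParList:
--         while par:
--             if par[0].find("=") > -1:
--                 outParList.append(par[0])
--                 i += 1
--             else:
--                 outParList[i] += " " + par[0]
--             del par[0]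
--     return outParList
-- ===== SOURCE B (Python) =====
-- def _build(toks):
--     # recursively split the token stream at "="-bearing tokens
--     if not toks:
--         return []
--     vals = []
--     for t in toks[1:]:
--         if "=" in t:
--             break
--         vals.append(t)
--     cut = 1 + len(vals)
--     return [" ".join(toks[:cut])] + _build(toks[cut:])
--
-- def MakeXDSParam(inParList):
--     """
--     Parse input from parameters modifying XDS.INP
--     (does not mutate the input sublists; return value only).
--     """
--     return _build([t for par in inParList for t in par])
-- ===== Notes on version B (the rewrite author's own statement) =====
-- stated objective: alternative
-- what changed: B first flattens the token stream, then builds the output by recursive splitting: it slices off one 'PAR= values...' group at a time (head token plus the following '='-free tokens, joined once), instead of A's destructive index-tracking loop that grows outParList[i] with string +=; B does not mutate the input sublists.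
import Mathlib
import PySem

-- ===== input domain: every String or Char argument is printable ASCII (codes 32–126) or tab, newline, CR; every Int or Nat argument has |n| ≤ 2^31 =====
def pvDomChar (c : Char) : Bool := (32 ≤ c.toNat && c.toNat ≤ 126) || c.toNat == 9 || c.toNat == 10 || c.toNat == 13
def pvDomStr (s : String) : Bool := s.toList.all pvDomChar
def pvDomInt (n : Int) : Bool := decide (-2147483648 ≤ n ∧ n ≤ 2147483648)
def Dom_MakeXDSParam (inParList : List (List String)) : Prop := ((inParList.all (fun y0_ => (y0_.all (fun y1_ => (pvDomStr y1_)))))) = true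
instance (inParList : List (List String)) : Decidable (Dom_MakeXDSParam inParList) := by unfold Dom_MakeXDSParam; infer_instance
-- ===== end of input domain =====

-- B flattens the tokens and recursively slices off one group at a time (head token plus the
-- following '='-free tokens, joined once) instead of A's destructive index-tracking loop with
-- string += (objective: alternative). Python A empties the input sublists in place; B does not
-- mutate them: the equivalence proved here is about the RETURN value only.

-- ===== PORT A =====
-- the while-par loop consumes par front to front (del par[0]); as a value computation that is a
-- left fold over par's elements.  outParList[i] += " " + par[0] is List.modify at i; under
-- Pre_ i = outParList.length - 1 ≥ 0; the only input shape reaching i = -1 raises IndexError in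
-- Python (excluded by Pre_), where (-1).toNat = 0 modifies an empty list (no-op).
def MakeXDSParam (inParList : List (List String)) : List String :=
  (inParList.foldl
    (fun (st : List String × Int) par =>
      par.foldl
        (fun (st : List String × Int) tok =>
          if PySem.Str.find tok "=" > -1 then
            (st.1 ++ [tok], st.2 + 1)
          else
            (st.1.modify st.2.toNat (fun s => s ++ " " ++ tok), st.2))
        st)
    ([], -1)).1

-- ===== PORT B =====
-- the for-with-break loop of _build collecting the leading '='-free tokens of toks[1:]
def pvTakeVals : List String → List String
  | [] => []
  | t :: r => if PySem.Str.isIn "=" t then [] else t :: pvTakeVals r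

-- _build: slice off one group (toks[:cut] joined), recurse on the remainder toks[cut:]
def pvBuild : List String → List String
  | [] => []
  | h :: rest =>
      PySem.Str.join " " (h :: rest.take (pvTakeVals rest).length)
        :: pvBuild (rest.drop (pvTakeVals rest).length)
termination_by toks => toks.length
decreasing_by simp

def MakeXDSParam_alt (inParList : List (List String)) : List String :=
  pvBuild inParList.flatten

-- ===== PRECONDITION & SPEC =====
-- Pre_ excludes exactly the inputs on which Python A raises IndexError: those whose first token
-- (over all sublists) does not contain "=", so the first iteration hits outParList[-1/i] with
-- outParList empty.
def Pre_MakeXDSParam (inParList : List (List String)) : Prop :=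
  inParList.flatten.head?.all (fun t => PySem.Str.isIn "=" t) = true
instance (inParList : List (List String)) : Decidable (Pre_MakeXDSParam inParList) := by
  unfold Pre_MakeXDSParam; infer_instance

def pvWitness_MakeXDSParam : List (List String) := [["JOB= XYCORR", "INIT"], ["NX=", "100"]]

def Spec_MakeXDSParam (inParList : List (List String)) (out : List String) : Prop := out = MakeXDSParam_alt inParList
instance (inParList : List (List String)) (out : List String) : Decidable (Spec_MakeXDSParam inParList out) := by unfold Spec_MakeXDSParam; infer_instance

-- ===== CLAIM (what is proved, stated in full; the proofs are below) =====
def Claim_equal_MakeXDSParam : Prop := ∀ (inParList : List (List String)), Dom_MakeXDSParam inParList → Pre_MakeXDSParam inParList → Spec_MakeXDSParam inParList (MakeXDSParam inParList)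

-- ===== LEMMAS AND PROOFS =====

theorem pvBuild_nil : pvBuild [] = [] := by rw [pvBuild.eq_def]

theorem pvBuild_cons (h : String) (rest : List String) :
    pvBuild (h :: rest)
      = PySem.Str.join " " (h :: rest.take (pvTakeVals rest).length)
          :: pvBuild (rest.drop (pvTakeVals rest).length) := by
  rw [pvBuild.eq_def]

-- A's token step (proof-side abbreviation)
def pvStepA (st : List String × Int) (tok : String) : List String × Int :=
  if PySem.Str.find tok "=" > -1 then (st.1 ++ [tok], st.2 + 1)
  else (st.1.modify st.2.toNat (fun s => s ++ " " ++ tok), st.2)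

def pvJoin (g : List String) : String := PySem.Str.join " " g

-- proof-side: the grouping B's recursion computes, as a structural recursion over the tokens
def pvGrp (cur : List String) : List String → List (List String)
  | [] => [cur]
  | t :: r => if PySem.Str.isIn "=" t then cur :: pvGrp [t] r else pvGrp (cur ++ [t]) r

theorem pvGrp_cons_pos (cur : List String) (t : String) (r : List String)
    (ht : PySem.Str.isIn "=" t = true) :
    pvGrp cur (t :: r) = cur :: pvGrp [t] r := by simp only [pvGrp, if_pos ht]

theorem pvGrp_cons_neg (cur : List String) (t : String) (r : List String)
    (ht : ¬ PySem.Str.isIn "=" t = true) :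
    pvGrp cur (t :: r) = pvGrp (cur ++ [t]) r := by simp only [pvGrp, if_neg ht]

theorem pvTakeVals_cons_pos (t : String) (r : List String)
    (ht : PySem.Str.isIn "=" t = true) : pvTakeVals (t :: r) = [] := by
  simp only [pvTakeVals, if_pos ht]

theorem pvTakeVals_cons_neg (t : String) (r : List String)
    (ht : ¬ PySem.Str.isIn "=" t = true) : pvTakeVals (t :: r) = t :: pvTakeVals r := by
  simp only [pvTakeVals, if_neg ht]

theorem pvFind_iff_isIn (tok : String) :
    (PySem.Str.find tok "=" > -1) ↔ PySem.Str.isIn "=" tok = true := by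
  rw [PySem.Str.isIn_iff_infix, ← PySem.Str.find_ne_neg_one_iff]
  constructor
  · intro h; omega
  · intro h
    have := PySem.Chars.neg_one_le_find tok.toList "=".toList
    simp only [PySem.Str.find] at h ⊢
    omega

theorem pvChars_join_append (sep : List Char) (ps : List (List Char)) (q : List Char)
    (h : ps ≠ []) :
    PySem.Chars.join sep (ps ++ [q]) = PySem.Chars.join sep ps ++ sep ++ q := by
  induction ps with
  | nil => exact absurd rfl h
  | cons p rest ih =>
    cases rest with
    | nil => simp only [List.cons_append, List.nil_append, PySem.Chars.join_cons_cons,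
        PySem.Chars.join_singleton]
    | cons p' rest' =>
      have h2 := ih (by simp)
      rw [List.cons_append] at h2
      rw [List.cons_append, List.cons_append, PySem.Chars.join_cons_cons,
        PySem.Chars.join_cons_cons, h2]
      simp [List.append_assoc]

theorem pvJoin_append (g : List String) (tok : String) (h : g ≠ []) :
    pvJoin (g ++ [tok]) = pvJoin g ++ " " ++ tok := by
  apply String.toList_inj.mp
  simp only [pvJoin, PySem.Str.toList_join, String.toList_append, List.map_append, List.map_cons,
    List.map_nil]
  exact pvChars_join_append _ _ _ (by simpa using h)

theorem pvJoin_singleton (tok : String) : pvJoin [tok] = tok := by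
  apply String.toList_inj.mp
  simp only [pvJoin, PySem.Str.toList_join, List.map_cons, List.map_nil]
  exact PySem.Chars.join_singleton _ _

theorem pvTake_takeVals (r : List String) :
    r.take (pvTakeVals r).length = pvTakeVals r := by
  induction r with
  | nil => rfl
  | cons t rest ih =>
    by_cases h : PySem.Str.isIn "=" t = true
    · simp [pvTakeVals_cons_pos t rest h]
    · simp [pvTakeVals_cons_neg t rest h, ih]

-- the groups B's recursion yields are exactly pvGrp, joined
theorem pvGrp_build (toks : List String) : ∀ (h : String) (vs : List String),
    (pvGrp (h :: vs) toks).map pvJoin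
      = pvJoin (h :: (vs ++ pvTakeVals toks)) :: pvBuild (toks.drop (pvTakeVals toks).length) := by
  induction toks with
  | nil => intro h vs; simp [pvGrp, pvTakeVals, pvBuild_nil]
  | cons t r ih =>
    intro h vs
    by_cases ht : PySem.Str.isIn "=" t = true
    · rw [pvGrp_cons_pos _ _ _ ht, pvTakeVals_cons_pos _ _ ht, List.map_cons, ih t []]
      simp only [List.length_nil, List.drop_zero, List.append_nil]
      rw [pvBuild_cons, pvTake_takeVals]
      simp [pvJoin]
    · rw [pvGrp_cons_neg _ _ _ ht, pvTakeVals_cons_neg _ _ ht]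
      simp only [List.cons_append]
      rw [ih h (vs ++ [t])]
      simp

theorem pvModify_append_singleton {α : Type} (xs : List α) (y : α) (f : α → α) :
    (xs ++ [y]).modify xs.length f = xs ++ [f y] := by
  induction xs with
  | nil => rfl
  | cons x rest ih => simpa [List.modify_succ_cons] using ih

-- loop invariant: A's state is (joined groups, #groups - 1)
theorem pvMain (toks : List String) : ∀ (gs : List (List String)) (cur : List String),
    cur ≠ [] →
    (toks.foldl pvStepA ((gs ++ [cur]).map pvJoin, (gs.length : Int))).1
      = (gs ++ pvGrp cur toks).map pvJoin := by
  induction toks with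
  | nil => intro gs cur _; simp [pvGrp]
  | cons t r ih =>
    intro gs cur hcur
    simp only [List.foldl_cons]
    by_cases ht : PySem.Str.isIn "=" t = true
    · have hf : PySem.Str.find t "=" > -1 := (pvFind_iff_isIn t).mpr ht
      have e1 : pvStepA ((gs ++ [cur]).map pvJoin, (gs.length : Int)) t
          = (((gs ++ [cur]) ++ [[t]]).map pvJoin, ((gs ++ [cur]).length : Int)) := by
        simp only [pvStepA, if_pos hf]
        refine Prod.ext ?_ ?_
        · simp [pvJoin_singleton]
        · simp
      rw [e1, ih (gs ++ [cur]) [t] (by simp)]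
      rw [pvGrp_cons_pos _ _ _ ht]
      simp
    · have hf : ¬ (PySem.Str.find t "=" > -1) := fun hc => ht ((pvFind_iff_isIn t).mp hc)
      have e1 : pvStepA ((gs ++ [cur]).map pvJoin, (gs.length : Int)) t
          = ((gs ++ [cur ++ [t]]).map pvJoin, (gs.length : Int)) := by
        simp only [pvStepA, if_neg hf]
        refine Prod.ext ?_ rfl
        have htoNat : ((gs.length : Int)).toNat = gs.length := by omega
        simp only [htoNat, List.map_append, List.map_cons, List.map_nil]
        have := pvModify_append_singleton (gs.map pvJoin) (pvJoin cur)
          (fun s => s ++ " " ++ t)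
        rw [show (gs.map pvJoin).length = gs.length from List.length_map ..] at this
        rw [this, pvJoin_append cur t hcur]
      rw [e1, ih gs (cur ++ [t]) (by simp)]
      rw [pvGrp_cons_neg _ _ _ ht]

theorem pvA_flatten (inParList : List (List String)) :
    MakeXDSParam inParList = (inParList.flatten.foldl pvStepA ([], -1)).1 := by
  unfold MakeXDSParam
  rw [List.foldl_flatten]
  rfl

-- ===== VERDICT (by name: the statement is the Claim_ definition above) =====
theorem MakeXDSParam_spec : Claim_equal_MakeXDSParam := by
  intro inParList _ hpre
  unfold Spec_MakeXDSParam MakeXDSParam_alt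
  rw [pvA_flatten]
  unfold Pre_MakeXDSParam at hpre
  cases hfl : inParList.flatten with
  | nil => simp [pvBuild_nil]
  | cons t rest =>
    rw [hfl] at hpre
    simp only [List.head?_cons, Option.all_some] at hpre
    have hf : PySem.Str.find t "=" > -1 := (pvFind_iff_isIn t).mpr hpre
    simp only [List.foldl_cons]
    have e1 : pvStepA ([], -1) t
        = ((([] : List (List String)) ++ [[t]]).map pvJoin,
            ((List.length ([] : List (List String)) : Nat) : Int)) := by
      simp only [pvStepA, if_pos hf]
      refine Prod.ext ?_ ?_
      · simp [pvJoin_singleton]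
      · simp
    rw [e1, pvMain rest [] [t] (by simp)]
    rw [pvBuild_cons, pvTake_takeVals]
    simpa [pvJoin] using pvGrp_build rest t []
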